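-- pv_equiv track=rewrite | github.com/jayten-jeon/problem-solving | programmers/algorithm-practice-kit/brute-force/1.모의고사.py | solution
-- ===== SOURCE A (Python) =====
-- def get_score(pattern, answers):
--     n = len(pattern)
--     m = len(answers)
--     pattern = pattern * int(m / n) + pattern[:int(m % n)]
--     return sum([p == a for p, a in zip(pattern, answers)])
--
-- def solution(answers):
--     pattern1 = [1, 2, 3, 4, 5]
--     pattern2 = [2, 1, 2, 3, 2, 4, 2, 5]
--     pattern3 = [3, 3, 1, 1, 2, 2, 4, 4, 5, 5]
--     scores = [get_score(pattern1, answers), get_score(pattern2, answers), get_score(pattern3, answers)]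
--     max_score = max(scores)
--     answer = [i+1 for i, s in enumerate(scores) if s == max_score]
--     return answer
-- ===== SOURCE B (Python) =====
-- def solution(answers):
--     pattern1 = [1, 2, 3, 4, 5]
--     pattern2 = [2, 1, 2, 3, 2, 4, 2, 5]
--     pattern3 = [3, 3, 1, 1, 2, 2, 4, 4, 5, 5]
--     c1 = c2 = c3 = 0
--     for i, a in enumerate(answers):
--         if a == pattern1[i % 5]:
--             c1 += 1
--         if a == pattern2[i % 8]:
--             c2 += 1
--         if a == pattern3[i % 10]:
--             c3 += 1
--     scores = [c1, c2, c3]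
--     max_score = max(scores)
--     return [i + 1 for i, s in enumerate(scores) if s == max_score]
-- ===== Notes on version B (the rewrite author's own statement) =====
-- stated objective: alternative
-- what changed: Replaces three get_score passes that each materialize a length-m extended pattern list and zip it against answers with a single enumerate loop over answers maintaining three counters via modular indexing into the fixed patterns.
import Mathlib
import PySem

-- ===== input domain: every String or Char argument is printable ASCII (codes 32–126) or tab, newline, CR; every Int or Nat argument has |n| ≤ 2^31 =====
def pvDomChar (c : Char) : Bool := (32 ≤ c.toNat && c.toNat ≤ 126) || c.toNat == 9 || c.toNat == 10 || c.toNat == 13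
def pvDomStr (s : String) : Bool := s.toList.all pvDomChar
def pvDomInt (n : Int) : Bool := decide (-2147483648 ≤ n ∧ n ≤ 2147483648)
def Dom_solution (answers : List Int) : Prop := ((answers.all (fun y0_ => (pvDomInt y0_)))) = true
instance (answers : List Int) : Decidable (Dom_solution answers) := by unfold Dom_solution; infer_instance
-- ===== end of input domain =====

-- B fuses A's three pattern-materializing scans into one enumerate pass with modular indexing (alternative decomposition).


-- ===== PORT A =====
-- get_score: extend the pattern to the answers' length (repetition + prefix), zip, count matches
def getScore (pattern answers : List Int) : Int :=
  let n := pattern.length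
  let m := answers.length
  let pattern' := (List.replicate (m / n) pattern).flatten ++ pattern.take (m % n)
  ((pattern'.zip answers).map (fun pa => if pa.1 = pa.2 then (1 : Int) else 0)).sum

def solution (answers : List Int) : List Int :=
  let pattern1 : List Int := [1, 2, 3, 4, 5]
  let pattern2 : List Int := [2, 1, 2, 3, 2, 4, 2, 5]
  let pattern3 : List Int := [3, 3, 1, 1, 2, 2, 4, 4, 5, 5]
  let scores : List Int := [getScore pattern1 answers, getScore pattern2 answers, getScore pattern3 answers]
  let maxScore : Int := (PySem.List.max? scores (fun x => x)).getD 0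
  (PySem.List.enumerate scores).filterMap (fun is => if is.2 = maxScore then some (is.1 + 1) else none)

-- ===== PORT B =====
def solution_alt (answers : List Int) : List Int :=
  let pattern1 : List Int := [1, 2, 3, 4, 5]
  let pattern2 : List Int := [2, 1, 2, 3, 2, 4, 2, 5]
  let pattern3 : List Int := [3, 3, 1, 1, 2, 2, 4, 4, 5, 5]
  let c := (PySem.List.enumerate answers).foldl
    (fun (c : Int × Int × Int) (ia : Int × Int) =>
      (if ia.2 = pattern1.getD (ia.1.toNat % 5) 0 then c.1 + 1 else c.1,
       if ia.2 = pattern2.getD (ia.1.toNat % 8) 0 then c.2.1 + 1 else c.2.1,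
       if ia.2 = pattern3.getD (ia.1.toNat % 10) 0 then c.2.2 + 1 else c.2.2))
    (0, 0, 0)
  let scores : List Int := [c.1, c.2.1, c.2.2]
  let maxScore : Int := (PySem.List.max? scores (fun x => x)).getD 0
  (PySem.List.enumerate scores).filterMap (fun is => if is.2 = maxScore then some (is.1 + 1) else none)

-- ===== PRECONDITION & SPEC =====
def Spec_solution (answers : List Int) (out : List Int) : Prop := out = solution_alt answers
instance (answers : List Int) (out : List Int) : Decidable (Spec_solution answers out) := by unfold Spec_solution; infer_instance

-- ===== CLAIM (what is proved, stated in full; the proofs are below) =====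
def Claim_equal_solution : Prop := ∀ (answers : List Int), Dom_solution answers → Spec_solution answers (solution answers)

-- ===== LEMMAS AND PROOFS =====

-- proof-side counting function: matches of answers against the cyclic pattern starting at index k
def cnt (p : List Int) (n : Nat) : Nat → List Int → Int
  | _, [] => 0
  | k, a :: ans => (if a = p.getD (k % n) 0 then (1 : Int) else 0) + cnt p n (k + 1) ans

theorem flatten_replicate_getD (p : List Int) (n : Nat) (hn : n = p.length) :
    ∀ (c i : Nat), i < c * n → ((List.replicate c p).flatten).getD i 0 = p.getD (i % n) 0 := by
  intro c
  induction c with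
  | zero => intro i hi; omega
  | succ c ih =>
    intro i hi
    rw [List.replicate_succ, List.flatten_cons]
    have hsm : (c + 1) * n = c * n + n := Nat.succ_mul c n
    by_cases h : i < p.length
    · rw [List.getD_append _ _ _ _ h, Nat.mod_eq_of_lt (by omega)]
    · rw [List.getD_append_right _ _ _ _ (by omega)]
      have h2 : (i - p.length) % n = i % n := by
        conv_rhs => rw [show i = (i - p.length) + n by omega]
        rw [Nat.add_mod_right]
      rw [← h2]
      exact ih (i - p.length) (by omega)

theorem extPat_getD (p : List Int) (m : Nat) (hpos : 0 < p.length) :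
    ∀ i, i < m →
      (((List.replicate (m / p.length) p).flatten ++ p.take (m % p.length)).getD i 0)
        = p.getD (i % p.length) 0 := by
  intro i hi
  set n := p.length with hn
  have hlen : ((List.replicate (m / n) p).flatten).length = (m / n) * n := by
    simp [List.length_flatten, Nat.mul_comm, hn]
  have hdm := Nat.div_add_mod m n
  have hcm : n * (m / n) = (m / n) * n := Nat.mul_comm _ _
  have hmlt : m % n < n := Nat.mod_lt _ hpos
  by_cases h : i < (m / n) * n
  · rw [List.getD_append _ _ _ _ (by omega)]
    exact flatten_replicate_getD p n rfl _ i h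
  · rw [List.getD_append_right _ _ _ _ (by omega)]
    have hjlt : i - (m / n) * n < m % n := by omega
    have htake : (p.take (m % n)).getD (i - ((List.replicate (m / n) p).flatten).length) 0
        = p.getD (i - (m / n) * n) 0 := by
      rw [hlen]
      have hlt : i - (m / n) * n < (p.take (m % n)).length := by
        rw [List.length_take, Nat.min_eq_left (le_of_lt hmlt)]
        omega
      rw [List.getD_eq_getElem _ _ hlt, List.getElem_take,
        List.getD_eq_getElem _ _ (by omega)]
    have hmod2 : i % n = i - (m / n) * n := by
      conv_lhs => rw [show i = (m / n) * n + (i - (m / n) * n) from by omega]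
      rw [← hcm, Nat.mul_add_mod, Nat.mod_eq_of_lt (by omega)]
    rw [htake, hmod2]

theorem zipSum (p : List Int) (n : Nat) :
    ∀ (ans q : List Int) (k : Nat), q.length = ans.length →
      (∀ i, i < ans.length → q.getD i 0 = p.getD ((k + i) % n) 0) →
      ((q.zip ans).map (fun pa => if pa.1 = pa.2 then (1 : Int) else 0)).sum = cnt p n k ans := by
  intro ans
  induction ans with
  | nil => intro q k hl _; have : q = [] := List.eq_nil_of_length_eq_zero (by simpa using hl)
           simp [this, cnt]
  | cons a ans ih =>
    intro q k hl h
    match q, hl with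
    | b :: q', hl =>
      have hb : b = p.getD (k % n) 0 := by
        have := h 0 (by simp); simpa using this
      have htail : ((q'.zip ans).map (fun pa => if pa.1 = pa.2 then (1 : Int) else 0)).sum
          = cnt p n (k + 1) ans := by
        apply ih q' (k + 1) (by simpa using hl)
        intro i hi
        have := h (i + 1) (by simp; omega)
        simpa [show k + (i + 1) = k + 1 + i by omega] using this
      simp only [List.zip_cons_cons, List.map_cons, List.sum_cons, htail, cnt, hb]
      by_cases hc : a = p.getD (k % n) 0
      · simp [hc]
      · rw [if_neg hc, if_neg (fun hx => hc hx.symm)]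

theorem getScore_eq_cnt (p ans : List Int) (hpos : 0 < p.length) :
    getScore p ans = cnt p p.length 0 ans := by
  unfold getScore
  apply zipSum
  · have hmod : ans.length % p.length < p.length := Nat.mod_lt _ hpos
    rw [List.length_append, List.length_take, Nat.min_eq_left (le_of_lt hmod),
      List.length_flatten]
    simp only [List.map_replicate, List.sum_replicate, smul_eq_mul]
    have := Nat.div_add_mod ans.length p.length
    have hcm2 : p.length * (ans.length / p.length) = (ans.length / p.length) * p.length :=
      Nat.mul_comm _ _
    omega
  · intro i hi
    have := extPat_getD p ans.length hpos i hi
    simpa using this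

theorem foldB (ans : List Int) : ∀ (k : Nat) (c1 c2 c3 : Int),
    (PySem.List.enumerate ans (k : Int)).foldl
      (fun (c : Int × Int × Int) (ia : Int × Int) =>
        (if ia.2 = ([1, 2, 3, 4, 5] : List Int).getD (ia.1.toNat % 5) 0 then c.1 + 1 else c.1,
         if ia.2 = ([2, 1, 2, 3, 2, 4, 2, 5] : List Int).getD (ia.1.toNat % 8) 0 then c.2.1 + 1 else c.2.1,
         if ia.2 = ([3, 3, 1, 1, 2, 2, 4, 4, 5, 5] : List Int).getD (ia.1.toNat % 10) 0 then c.2.2 + 1 else c.2.2))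
      (c1, c2, c3)
    = (c1 + cnt [1, 2, 3, 4, 5] 5 k ans,
       c2 + cnt [2, 1, 2, 3, 2, 4, 2, 5] 8 k ans,
       c3 + cnt [3, 3, 1, 1, 2, 2, 4, 4, 5, 5] 10 k ans) := by
  induction ans with
  | nil => intro k c1 c2 c3; simp [PySem.List.enumerate_nil, cnt]
  | cons a ans ih =>
    intro k c1 c2 c3
    rw [PySem.List.enumerate_cons, List.foldl_cons]
    have hk : ((k : Int) + 1) = ((k + 1 : Nat) : Int) := by push_cast; ring
    rw [hk, ih (k + 1)]
    simp only [cnt, Int.toNat_natCast]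
    refine Prod.ext ?_ (Prod.ext ?_ ?_) <;> simp only [] <;> split_ifs <;> ring

-- ===== VERDICT (by name: the statement is the Claim_ definition above) =====
theorem solution_spec : Claim_equal_solution := by
  intro answers _
  unfold Spec_solution solution solution_alt
  have h1 := getScore_eq_cnt [1, 2, 3, 4, 5] answers (by simp)
  have h2 := getScore_eq_cnt [2, 1, 2, 3, 2, 4, 2, 5] answers (by simp)
  have h3 := getScore_eq_cnt [3, 3, 1, 1, 2, 2, 4, 4, 5, 5] answers (by simp)
  have hf := foldB answers 0 0 0 0
  simp only [List.length_cons, List.length_nil] at h1 h2 h3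
  simp only [Nat.cast_zero] at hf
  simp only [h1, h2, h3, hf, zero_add]
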